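-- pv_equiv track=rewrite | github.com/vnikola86/DevelopersLab | domaci_2/20_digit_sum_product.py | calculate_digit_sum_product
-- ===== SOURCE A (Python) =====
-- def calculate_digit_sum_product(number):
--
--     if number % 2 == 0:  # If the number is even
--         even_digit_sum = sum(int(digit) for digit in str(number) if int(digit) % 2 == 0)
--         return even_digit_sum
--     else:  # If the number is odd
--         odd_digit_product = 1
--         for digit in str(number):
--             if int(digit) % 2 != 0:
--                 odd_digit_product *= int(digit)
--         return odd_digit_product
-- ===== SOURCE B (Python) =====
-- def calculate_digit_sum_product(number):
--     even_sum = 0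
--     odd_prod = 1
--     n = number
--     while n > 0:
--         n, d = divmod(n, 10)
--         if d % 2 == 0:
--             even_sum += d
--         else:
--             odd_prod *= d
--     return even_sum if number % 2 == 0 else odd_prod
-- ===== Notes on version B (the rewrite author's own statement) =====
-- stated objective: alternative
-- what changed: A converts the number to a string and makes a filtered pass per parity branch; B never builds a string: one arithmetic divmod loop extracts digits least-significant first, maintains both the even-digit sum and the odd-digit product, and selects one at the end.
import Mathlib
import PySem

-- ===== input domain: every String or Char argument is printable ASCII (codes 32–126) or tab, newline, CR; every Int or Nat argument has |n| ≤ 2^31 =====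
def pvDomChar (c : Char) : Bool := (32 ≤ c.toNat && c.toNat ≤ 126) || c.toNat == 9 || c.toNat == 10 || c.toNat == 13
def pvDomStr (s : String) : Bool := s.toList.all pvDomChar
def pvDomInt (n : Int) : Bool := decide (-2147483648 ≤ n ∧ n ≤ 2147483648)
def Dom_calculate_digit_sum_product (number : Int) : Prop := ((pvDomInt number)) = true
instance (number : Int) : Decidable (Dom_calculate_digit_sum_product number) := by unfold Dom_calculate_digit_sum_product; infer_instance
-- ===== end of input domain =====

-- B replaces A's branch-then-string-pass by one arithmetic divmod loop maintaining both
-- accumulators and selecting at the end (objective: alternative decomposition, no string pass).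

-- ===== PORT A =====
-- int(digit) is ported as (PySem.Int.ofChars? [c]).getD 0: on Pre_ (number ≥ 0) every
-- character of str(number) is a decimal digit, so the option is always `some` there;
-- Python raises ValueError exactly where it is `none` (the '-' sign), excluded by Pre_.
def calculate_digit_sum_product (number : Int) : Int :=
  if PySem.Int.mod number 2 = 0 then
    (PySem.Int.toChars number).foldl
      (fun acc c =>
        let v := (PySem.Int.ofChars? [c]).getD 0
        if PySem.Int.mod v 2 = 0 then acc + v else acc) 0
  else
    (PySem.Int.toChars number).foldl
      (fun acc c =>
        let v := (PySem.Int.ofChars? [c]).getD 0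
        if PySem.Int.mod v 2 ≠ 0 then acc * v else acc) 1

-- ===== PORT B =====
-- the `while n > 0: n, d = divmod(n, 10); …` loop of Source B, d = n % 10 inlined
-- (terminates for every Int: on n ≤ 0 the guard fails at once)
def pvBLoop (n es op : Int) : Int × Int :=
  if _h : 0 < n then
    pvBLoop (PySem.Int.floordiv n 10)
      (if PySem.Int.mod (PySem.Int.mod n 10) 2 = 0 then es + PySem.Int.mod n 10 else es)
      (if PySem.Int.mod (PySem.Int.mod n 10) 2 = 0 then op else op * PySem.Int.mod n 10)
  else (es, op)
termination_by n.toNat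
decreasing_by
  have hn : n = ((n.toNat : Nat) : Int) := by omega
  rw [hn]
  have hf : PySem.Int.floordiv ((n.toNat : Nat) : Int) 10 = ((n.toNat / 10 : Nat) : Int) := by
    exact_mod_cast PySem.Int.floordiv_natCast n.toNat 10
  rw [hf]
  simp only [Int.toNat_natCast]
  exact Nat.div_lt_self (by omega) (by norm_num)

def calculate_digit_sum_product_alt (number : Int) : Int :=
  if PySem.Int.mod number 2 = 0 then (pvBLoop number 0 1).1 else (pvBLoop number 0 1).2

-- ===== PRECONDITION & SPEC =====
-- Pre_ excludes exactly the negative numbers: there str(number) starts with '-' and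
-- A raises ValueError on int('-').
def Pre_calculate_digit_sum_product (number : Int) : Prop := 0 ≤ number
instance (number : Int) : Decidable (Pre_calculate_digit_sum_product number) := by
  unfold Pre_calculate_digit_sum_product; infer_instance

def pvWitness_calculate_digit_sum_product : Int := (1234)

def Spec_calculate_digit_sum_product (number : Int) (out : Int) : Prop := out = calculate_digit_sum_product_alt number
instance (number : Int) (out : Int) : Decidable (Spec_calculate_digit_sum_product number out) := by unfold Spec_calculate_digit_sum_product; infer_instance

-- ===== CLAIM (what is proved, stated in full; the proofs are below) =====
def Claim_equal_calculate_digit_sum_product : Prop := ∀ (number : Int), Dom_calculate_digit_sum_product number → Pre_calculate_digit_sum_product number → Spec_calculate_digit_sum_product number (calculate_digit_sum_product number)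

-- ===== LEMMAS AND PROOFS =====

-- most-significant-first digit characters of m, mirroring Nat.toDigitsCore's build
def pvChars (m : Nat) : List Char :=
  if h : m / 10 = 0 then [Nat.digitChar (m % 10)]
  else pvChars (m / 10) ++ [Nat.digitChar (m % 10)]
termination_by m
decreasing_by exact Nat.div_lt_self (by omega) (by norm_num)

-- per-digit pair (even-digit sum, odd-digit product) of m
def pvDigs (m : Nat) : Int × Int :=
  if m = 0 then (0, 1)
  else
    (if ((m % 10 : Nat) : Int) % 2 = 0 then (pvDigs (m / 10)).1 + ((m % 10 : Nat) : Int)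
     else (pvDigs (m / 10)).1,
     if ((m % 10 : Nat) : Int) % 2 = 0 then (pvDigs (m / 10)).2
     else (pvDigs (m / 10)).2 * ((m % 10 : Nat) : Int))
decreasing_by all_goals exact Nat.div_lt_self (by omega) (by norm_num)

theorem pvDigs_zero : pvDigs 0 = (0, 1) := by rw [pvDigs]; norm_num

theorem pvDigs_ne (m : Nat) (h0 : m ≠ 0) : pvDigs m =
    (if ((m % 10 : Nat) : Int) % 2 = 0 then (pvDigs (m / 10)).1 + ((m % 10 : Nat) : Int)
     else (pvDigs (m / 10)).1,
     if ((m % 10 : Nat) : Int) % 2 = 0 then (pvDigs (m / 10)).2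
     else (pvDigs (m / 10)).2 * ((m % 10 : Nat) : Int)) := by
  conv_lhs => rw [pvDigs]
  rw [if_neg h0]

theorem pvToDigitsCore_eq (fuel : Nat) : ∀ (m : Nat), m < fuel → ∀ (ds : List Char),
    Nat.toDigitsCore 10 fuel m ds = pvChars m ++ ds := by
  induction fuel with
  | zero => omega
  | succ f ih =>
    intro m hm ds
    rw [Nat.toDigitsCore, pvChars]
    by_cases h : m / 10 = 0
    · simp [h]
    · simp only [h, if_false]
      rw [ih (m / 10) (by have := Nat.div_lt_self (by omega : 0 < m) (by norm_num : 1 < 10); omega)]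
      simp

theorem pvToChars_nonneg (n : Int) (h : 0 ≤ n) :
    PySem.Int.toChars n = pvChars n.toNat := by
  rw [PySem.Int.toChars, if_neg (by omega)]
  exact (pvToDigitsCore_eq (n.toNat + 1) n.toNat (Nat.lt_succ_self _) []).trans (by simp)

theorem pvDigitVal (d : Nat) (hd : d < 10) :
    (PySem.Int.ofChars? [Nat.digitChar d]).getD 0 = (d : Int) := by
  interval_cases d <;> decide

theorem pvMod2 (v : Int) : PySem.Int.mod v 2 = v % 2 :=
  PySem.Int.mod_eq_emod_of_pos (by norm_num)

theorem pvFoldEven (m : Nat) : ∀ (init : Int),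
    (pvChars m).foldl
      (fun acc c =>
        let v := (PySem.Int.ofChars? [c]).getD 0
        if PySem.Int.mod v 2 = 0 then acc + v else acc) init
    = init + (pvDigs m).1 := by
  induction m using Nat.strong_induction_on with
  | _ m ih =>
    intro init
    have hd : m % 10 < 10 := Nat.mod_lt _ (by norm_num)
    by_cases h0 : m = 0
    · subst h0
      rw [pvChars, dif_pos (by norm_num : (0:Nat)/10 = 0)]
      simp only [List.foldl_cons, List.foldl_nil, pvDigs_zero]
      rw [Nat.zero_mod, pvDigitVal 0 (by norm_num), pvMod2]
      norm_num
    · rw [pvChars, pvDigs_ne m h0]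
      by_cases h : m / 10 = 0
      · rw [dif_pos h, h]
        simp only [List.foldl_cons, List.foldl_nil, pvDigs_zero]
        rw [pvDigitVal _ hd, pvMod2]
        generalize ((m % 10 : Nat) : Int) = e
        split_ifs with he <;> ring
      · rw [dif_neg h]
        simp only [List.foldl_append]
        rw [ih (m / 10) (Nat.div_lt_self (by omega) (by norm_num))]
        simp only [List.foldl_cons, List.foldl_nil]
        rw [pvDigitVal _ hd, pvMod2]
        generalize ((m % 10 : Nat) : Int) = e
        split_ifs with he <;> ring

theorem pvFoldOdd (m : Nat) : ∀ (init : Int),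
    (pvChars m).foldl
      (fun acc c =>
        let v := (PySem.Int.ofChars? [c]).getD 0
        if PySem.Int.mod v 2 ≠ 0 then acc * v else acc) init
    = init * (pvDigs m).2 := by
  induction m using Nat.strong_induction_on with
  | _ m ih =>
    intro init
    have hd : m % 10 < 10 := Nat.mod_lt _ (by norm_num)
    by_cases h0 : m = 0
    · subst h0
      rw [pvChars, dif_pos (by norm_num : (0:Nat)/10 = 0)]
      simp only [List.foldl_cons, List.foldl_nil, pvDigs_zero]
      rw [Nat.zero_mod, pvDigitVal 0 (by norm_num), pvMod2]
      norm_num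
    · rw [pvChars, pvDigs_ne m h0]
      by_cases h : m / 10 = 0
      · rw [dif_pos h, h]
        simp only [List.foldl_cons, List.foldl_nil, pvDigs_zero]
        rw [pvDigitVal _ hd, pvMod2]
        generalize ((m % 10 : Nat) : Int) = e
        split_ifs with he hf
        all_goals try (simp only [not_not] at he; exact absurd he hf)
        all_goals ring
      · rw [dif_neg h]
        simp only [List.foldl_append]
        rw [ih (m / 10) (Nat.div_lt_self (by omega) (by norm_num))]
        simp only [List.foldl_cons, List.foldl_nil]
        rw [pvDigitVal _ hd, pvMod2]
        generalize ((m % 10 : Nat) : Int) = e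
        split_ifs with he hf
        all_goals try (simp only [not_not] at he; exact absurd he hf)
        all_goals ring

theorem pvBLoop_natCast (m : Nat) : ∀ (es op : Int),
    pvBLoop (m : Int) es op = (es + (pvDigs m).1, op * (pvDigs m).2) := by
  induction m using Nat.strong_induction_on with
  | _ m ih =>
    intro es op
    rw [pvBLoop]
    by_cases h0 : m = 0
    · subst h0
      simp [pvDigs_zero]
    · rw [dif_pos (by exact_mod_cast Nat.pos_of_ne_zero h0)]
      have hfd : PySem.Int.floordiv (m : Int) 10 = ((m / 10 : Nat) : Int) := by
        exact_mod_cast PySem.Int.floordiv_natCast m 10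
      have hmd : PySem.Int.mod (m : Int) 10 = ((m % 10 : Nat) : Int) := by
        exact_mod_cast PySem.Int.mod_natCast m 10
      rw [hfd, hmd, pvMod2, ih (m / 10) (Nat.div_lt_self (Nat.pos_of_ne_zero h0) (by norm_num))]
      rw [pvDigs_ne m h0]
      generalize ((m % 10 : Nat) : Int) = e
      split_ifs with he <;> exact Prod.ext (by ring) (by ring)

-- ===== VERDICT (by name: the statement is the Claim_ definition above) =====
theorem calculate_digit_sum_product_spec : Claim_equal_calculate_digit_sum_product := by
  intro number _ hpre
  unfold Spec_calculate_digit_sum_product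
  unfold calculate_digit_sum_product calculate_digit_sum_product_alt
  have hcast : number = ((number.toNat : Nat) : Int) := by
    have : (0:Int) ≤ number := hpre
    omega
  rw [pvToChars_nonneg number hpre, hcast, pvBLoop_natCast number.toNat 0 1]
  simp only [Int.toNat_natCast]
  split_ifs with h
  · rw [pvFoldEven]
  · rw [pvFoldOdd]
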